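-- pv_equiv track=rewrite | github.com/AyayaXiaowang/Ayaya_Miliastra_Editor | private_extensions/ugc_file_tools/commands/misc/import_type_id_cn_mapping_csv.py | _sorted_mapping_keys
-- ===== SOURCE A (Python) =====
-- from typing import Any, Dict, List, Optional, Sequence, Tuple
--
-- def _sorted_mapping_keys(mapping: Dict[str, Any]) -> List[str]:
--     numeric: List[str] = []
--     other: List[str] = []
--     for k in mapping.keys():
--         if isinstance(k, str) and k.lstrip("-").isdigit():
--             numeric.append(k)
--         else:
--             other.append(str(k))
--     numeric.sort(key=lambda x: int(x))
--     other.sort()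
--     return numeric + other
-- ===== SOURCE B (Python) =====
-- from typing import Any, Dict, List
--
-- def _sorted_mapping_keys(mapping: Dict[str, Any]) -> List[str]:
--     # One single stable sort with a composite key instead of partition + two sorts.
--     # Numeric-looking keys sort first by their integer value; all others after, lexicographically.
--     def sort_key(k):
--         if isinstance(k, str) and k.lstrip("-").isdigit():
--             return (0, int(k), "")
--         return (1, 0, str(k))
--     return sorted((k if isinstance(k, str) else str(k) for k in mapping.keys()), key=sort_key)
-- ===== Notes on version B (the rewrite author's own statement) =====
-- stated objective: alternative
-- what changed: Replaces the partition-into-two-lists + two separate sorts + concatenation with a single stable sort of all keys under one composite key (group, numeric value, string), relying on the lexicographic tuple order to keep numeric keys (by int value) before the rest (lexicographic).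
import Mathlib
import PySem

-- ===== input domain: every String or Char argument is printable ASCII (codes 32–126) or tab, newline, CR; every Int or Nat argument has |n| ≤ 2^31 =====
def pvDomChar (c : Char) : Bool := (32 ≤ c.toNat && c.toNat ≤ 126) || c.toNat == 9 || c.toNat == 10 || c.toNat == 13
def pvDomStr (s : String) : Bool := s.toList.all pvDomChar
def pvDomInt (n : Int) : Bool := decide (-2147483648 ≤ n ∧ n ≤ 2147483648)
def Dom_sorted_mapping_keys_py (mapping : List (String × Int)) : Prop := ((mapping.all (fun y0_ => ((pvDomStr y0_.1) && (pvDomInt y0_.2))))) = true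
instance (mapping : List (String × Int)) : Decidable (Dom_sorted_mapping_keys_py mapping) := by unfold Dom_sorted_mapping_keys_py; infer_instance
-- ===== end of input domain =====

-- B replaces A's partition + two sorts + concatenation by ONE stable sort under a composite
-- lexicographic key (group, int value, string); equal return values proved on Pre_.


-- k.lstrip("-").isdigit(): lstrip("-") drops exactly the leading '-' characters (exact),
-- isdigit is PySem.Chars.strIsdigit. isinstance(k, str) is always true (keys are typed str).
def pvNumLike (k : String) : Bool :=
  PySem.Chars.strIsdigit (k.toList.dropWhile (· == '-'))

-- int(k) as A's sort key; under Pre_ the parse succeeds on every key the guard admits.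
def pvIntKey (k : String) : Int := (PySem.Int.ofStr? k).getD 0

-- ===== PORT A =====
-- dict iteration = keys of the assoc list in first-insertion order; str(k) is the identity on str keys.
def sorted_mapping_keys_py (mapping : List (String × Int)) : List String :=
  let ks := (PySem.Dict.ofList mapping).keys
  let p := ks.foldl
    (fun (p : List String × List String) k =>
      if pvNumLike k then (p.1 ++ [k], p.2) else (p.1, p.2 ++ [k]))
    ([], [])
  PySem.List.sorted p.1 (fun x => pvIntKey x) false
    ++ PySem.List.sorted p.2 (fun x => x) false

-- ===== PORT B =====
-- the composite tuple key (group, int value, tiebreak string)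
def pvSortKeyB (k : String) : Int × Int × String :=
  if pvNumLike k then (0, pvIntKey k, "") else (1, 0, k)

-- Python's '<' on 3-tuples, written out lexicographically (exact: compare 1st, then 2nd, then 3rd)
def pvTupleLt (p q : Int × Int × String) : Bool :=
  decide (p.1 < q.1) ||
    (p.1 == q.1 && (decide (p.2.1 < q.2.1) ||
      (p.2.1 == q.2.1 && decide (p.2.2 < q.2.2))))

-- sorted(keys, key=sort_key) = PySem's stable insertion sort with 'key a < key b' as the tuple order
def sorted_mapping_keys_py_alt (mapping : List (String × Int)) : List String :=
  (PySem.Dict.ofList mapping).keys.foldl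
    (fun acc k => PySem.List.insertBy (fun a b => pvTupleLt (pvSortKeyB a) (pvSortKeyB b)) k acc) []

-- ===== PRECONDITION & SPEC =====
-- Pre_ excludes exactly the inputs where Python A raises ValueError: a key of two or more
-- leading '-' followed by digits (e.g. "--5") passes the lstrip/isdigit guard but int(k) fails.
-- (B's int(k) raises there too.)
def Pre_sorted_mapping_keys_py (mapping : List (String × Int)) : Prop :=
  ∀ p ∈ mapping, ¬ (['-', '-'] <+: p.1.toList ∧ pvNumLike p.1 = true)
instance (mapping : List (String × Int)) : Decidable (Pre_sorted_mapping_keys_py mapping) := by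
  unfold Pre_sorted_mapping_keys_py; infer_instance

def pvWitness_sorted_mapping_keys_py : (List (String × Int)) :=
  [("10", 1), ("2", 2), ("apple", 3), ("-3", 4), ("05", 5)]

def Spec_sorted_mapping_keys_py (mapping : List (String × Int)) (out : List String) : Prop := out = sorted_mapping_keys_py_alt mapping
instance (mapping : List (String × Int)) (out : List String) : Decidable (Spec_sorted_mapping_keys_py mapping out) := by unfold Spec_sorted_mapping_keys_py; infer_instance

-- ===== CLAIM (what is proved, stated in full; the proofs are below) =====
def Claim_equal_sorted_mapping_keys_py : Prop := ∀ (mapping : List (String × Int)), Dom_sorted_mapping_keys_py mapping → Pre_sorted_mapping_keys_py mapping → Spec_sorted_mapping_keys_py mapping (sorted_mapping_keys_py mapping)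

-- ===== LEMMAS AND PROOFS =====

theorem pvLt_num {x y : String} (hx : pvNumLike x = true) (hy : pvNumLike y = true) :
    pvTupleLt (pvSortKeyB x) (pvSortKeyB y) = decide (pvIntKey x < pvIntKey y) := by
  simp [pvTupleLt, pvSortKeyB, hx, hy]

theorem pvLt_num_other {x y : String} (hx : pvNumLike x = true) (hy : pvNumLike y = false) :
    pvTupleLt (pvSortKeyB x) (pvSortKeyB y) = true := by
  simp [pvTupleLt, pvSortKeyB, hx, hy]

theorem pvLt_other_num {x y : String} (hx : pvNumLike x = false) (hy : pvNumLike y = true) :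
    pvTupleLt (pvSortKeyB x) (pvSortKeyB y) = false := by
  simp [pvTupleLt, pvSortKeyB, hx, hy]

theorem pvLt_other {x y : String} (hx : pvNumLike x = false) (hy : pvNumLike y = false) :
    pvTupleLt (pvSortKeyB x) (pvSortKeyB y) = decide (x < y) := by
  simp [pvTupleLt, pvSortKeyB, hx, hy]

-- inserting a numeric key into (numeric block ++ other block) inserts into the numeric block
theorem pvIns_num (x : String) (A B : List String) (hx : pvNumLike x = true)
    (hA : ∀ a ∈ A, pvNumLike a = true) (hB : ∀ b ∈ B, pvNumLike b = false) :
    PySem.List.insertBy (fun a b => pvTupleLt (pvSortKeyB a) (pvSortKeyB b)) x (A ++ B)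
      = PySem.List.insertBy (fun a b => decide (pvIntKey a < pvIntKey b)) x A ++ B := by
  induction A with
  | nil =>
    cases B with
    | nil => rfl
    | cons b bs =>
      have hb : pvNumLike b = false := hB b (by simp)
      simp [PySem.List.insertBy, pvLt_num_other hx hb]
  | cons a as ih =>
    have ha : pvNumLike a = true := hA a (by simp)
    simp only [List.cons_append, PySem.List.insertBy, pvLt_num hx ha]
    by_cases h : pvIntKey x < pvIntKey a
    · simp [h]
    · simp [h, ih (fun a' ha' => hA a' (List.mem_cons_of_mem _ ha'))]

-- inside a block of non-numeric keys the tuple key compares like the plain string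
theorem pvIns_other_eq (x : String) (B : List String) (hx : pvNumLike x = false)
    (hB : ∀ b ∈ B, pvNumLike b = false) :
    PySem.List.insertBy (fun a b => pvTupleLt (pvSortKeyB a) (pvSortKeyB b)) x B
      = PySem.List.insertBy (fun a b => decide (a < b)) x B := by
  induction B with
  | nil => rfl
  | cons b bs ih =>
    have hb : pvNumLike b = false := hB b (by simp)
    simp only [PySem.List.insertBy, pvLt_other hx hb]
    rw [ih (fun b' hb' => hB b' (List.mem_cons_of_mem _ hb'))]

-- inserting a non-numeric key into (numeric block ++ other block) skips the numeric block
theorem pvIns_other (x : String) (A B : List String) (hx : pvNumLike x = false)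
    (hA : ∀ a ∈ A, pvNumLike a = true) (hB : ∀ b ∈ B, pvNumLike b = false) :
    PySem.List.insertBy (fun a b => pvTupleLt (pvSortKeyB a) (pvSortKeyB b)) x (A ++ B)
      = A ++ PySem.List.insertBy (fun a b => decide (a < b)) x B := by
  induction A with
  | nil => simpa using pvIns_other_eq x B hx hB
  | cons a as ih =>
    have ha : pvNumLike a = true := hA a (by simp)
    simp only [List.cons_append, PySem.List.insertBy, pvLt_other_num hx ha,
      Bool.false_eq_true, if_false]
    rw [ih (fun a' ha' => hA a' (List.mem_cons_of_mem _ ha'))]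

-- the single stable insertion sort by the composite key splits into the two block sorts
theorem pvSplit_foldl (L : List String) : ∀ (A B : List String),
    (∀ a ∈ A, pvNumLike a = true) → (∀ b ∈ B, pvNumLike b = false) →
    L.foldl (fun acc x => PySem.List.insertBy (fun a b => pvTupleLt (pvSortKeyB a) (pvSortKeyB b)) x acc) (A ++ B)
      = (L.filter pvNumLike).foldl (fun acc x => PySem.List.insertBy (fun a b => decide (pvIntKey a < pvIntKey b)) x acc) A
        ++ (L.filter (fun x => !pvNumLike x)).foldl (fun acc x => PySem.List.insertBy (fun a b => decide (a < b)) x acc) B := by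
  induction L with
  | nil => intro A B _ _; rfl
  | cons x xs ih =>
    intro A B hA hB
    by_cases hx : pvNumLike x = true
    · simp only [List.foldl_cons, List.filter_cons, hx, Bool.not_true, if_pos,
        Bool.false_eq_true]
      rw [pvIns_num x A B hx hA hB]
      exact ih _ B
        (fun a' ha' => ((PySem.List.mem_insertBy _ _ _ _).1 ha').elim (fun h => h ▸ hx) (hA a'))
        hB
    · have hx' : pvNumLike x = false := by simpa using hx
      simp only [List.foldl_cons, List.filter_cons, hx', Bool.not_false, if_pos,
        Bool.false_eq_true]
      rw [pvIns_other x A B hx' hA hB]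
      exact ih A _ hA
        (fun b' hb' => ((PySem.List.mem_insertBy _ _ _ _).1 hb').elim (fun h => h ▸ hx') (hB b'))

-- A's pair-building loop is the two filters
theorem pvPartition_eq (ks : List String) :
    ks.foldl
      (fun (p : List String × List String) k =>
        if pvNumLike k then (p.1 ++ [k], p.2) else (p.1, p.2 ++ [k]))
      ([], [])
    = (ks.filter pvNumLike, ks.filter (fun k => !pvNumLike k)) := by
  have hfun : (fun (p : List String × List String) k =>
      if pvNumLike k then (p.1 ++ [k], p.2) else (p.1, p.2 ++ [k]))
      = (fun (p : List String × List String) k =>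
        ((if pvNumLike k then p.1 ++ [k] else p.1),
         (if !pvNumLike k then p.2 ++ [k] else p.2))) := by
    funext p k
    by_cases h : pvNumLike k <;> simp [h]
  rw [hfun, PySem.List.foldl_prod_mk
      (f := fun (a : List String) k => if pvNumLike k then a ++ [k] else a)
      (g := fun (b : List String) k => if !pvNumLike k then b ++ [k] else b),
    PySem.List.foldl_append_if_eq_filter, PySem.List.foldl_append_if_eq_filter]
  simp

-- ===== VERDICT (by name: the statement is the Claim_ definition above) =====
theorem sorted_mapping_keys_py_spec : Claim_equal_sorted_mapping_keys_py := by
  intro mapping _ _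
  unfold Spec_sorted_mapping_keys_py sorted_mapping_keys_py sorted_mapping_keys_py_alt
  simp only [pvPartition_eq, PySem.List.sorted_eq_foldl_insertBy]
  simpa using (pvSplit_foldl ((PySem.Dict.ofList mapping).keys) [] []
    (by simp) (by simp)).symm
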